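-- pv_equiv track=rewrite | github.com/kryzp/advent-of-code | 2023/Day14/part1.py | load_col
-- ===== SOURCE A (Python) =====
-- def load_col(x, ll):
-- 	i = 0
-- 	base = len(ll)
-- 	n = 0
-- 	ret = 0
-- 	while True:
-- 		if ll[i][x] == 'O':
-- 			ret += base - n
-- 			n += 1
-- 		elif ll[i][x] == '#':
-- 			base = len(ll) - i - 1
-- 			n = 0
-- 		i += 1
-- 		if i >= len(ll):
-- 			break
-- 	return ret
-- ===== SOURCE B (Python) =====
-- def load_col(x, ll):
--     col = [row[x] for row in ll]
--     n = len(col)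
--
--     def go(start, rest):
--         if not rest:
--             return 0
--         i = 0
--         while i < len(rest) and rest[i] != '#':
--             i += 1
--         c = rest[:i].count('O')
--         return c * (n - start) - c * (c - 1) // 2 + go(start + i + 1, rest[i + 1:])
--
--     return go(0, col)
-- ===== Notes on version B (the rewrite author's own statement) =====
-- stated objective: alternative
-- what changed: B first extracts the column characters, then recurses over '#'-separated segments, computing each segment's load with the closed-form sum c*(n-start) - c*(c-1)//2 instead of A's per-rock base-n accumulation in a single stateful while loop.
import Mathlib
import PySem

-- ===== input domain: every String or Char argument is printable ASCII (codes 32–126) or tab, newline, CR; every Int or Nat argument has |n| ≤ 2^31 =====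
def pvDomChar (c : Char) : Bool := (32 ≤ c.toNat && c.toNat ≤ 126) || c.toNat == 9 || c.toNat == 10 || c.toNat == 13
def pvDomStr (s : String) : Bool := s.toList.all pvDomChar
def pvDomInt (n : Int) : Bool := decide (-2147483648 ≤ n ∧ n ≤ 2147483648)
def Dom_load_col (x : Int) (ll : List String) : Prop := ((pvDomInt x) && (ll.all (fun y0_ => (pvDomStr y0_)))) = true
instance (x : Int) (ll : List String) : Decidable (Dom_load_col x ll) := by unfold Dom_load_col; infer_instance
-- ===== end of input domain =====

-- B extracts the column, then recurses over '#'-separated segments, loading each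
-- with the closed-form sum c*(n-start) - c*(c-1)//2 (objective: alternative).


-- ===== PORT A =====
-- while-True loop over row index i with state (base, n, ret); ll[i][x] via pyGet?
-- (none = IndexError, outside Pre_: port returns 0 there).
def load_col_go (x : Int) (len : Int) : List String → Int → Int → Int → Int → Int
  | [], _, _, _, ret => ret
  | s :: rest, i, base, n, ret =>
    match PySem.Str.pyGet? s x with
    | none => 0
    | some ch =>
      if ch = 'O' then load_col_go x len rest (i + 1) base (n + 1) (ret + (base - n))
      else if ch = '#' then load_col_go x len rest (i + 1) (len - i - 1) 0 ret
      else load_col_go x len rest (i + 1) base n ret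

def load_col (x : Int) (ll : List String) : Int :=
  load_col_go x (ll.length : Int) ll 0 (ll.length : Int) 0 0

-- ===== PORT B =====
-- Source B's inner recursion go(start, rest): the inner index scan `while rest[i] != '#'`
-- is the takeWhile prefix, rest[:i].count('O') its rock count, rest[i+1:] the drop.
def load_col_alt_go (n : Int) (start : Int) : List Char → Int
  | [] => 0
  | a :: t =>
    let seg := (a :: t).takeWhile (fun ch => ch ≠ '#')
    let c : Int := (seg.count 'O' : Int)
    c * (n - start) - PySem.Int.floordiv (c * (c - 1)) 2
      + load_col_alt_go n (start + (seg.length : Int) + 1) ((a :: t).drop (seg.length + 1))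
termination_by rest => rest.length
decreasing_by
  simp only [List.length_drop, List.length_cons]
  omega

-- col = [row[x] for row in ll]; the comprehension raises iff some pyGet? is none
-- (outside Pre_: port returns 0 there).
def load_col_alt (x : Int) (ll : List String) : Int :=
  if ll.all (fun s => (PySem.Str.pyGet? s x).isSome) then
    load_col_alt_go (ll.length : Int) 0 (ll.filterMap (fun s => PySem.Str.pyGet? s x))
  else 0

-- ===== PRECONDITION & SPEC =====
-- Pre_ excludes exactly the inputs where Python A raises IndexError: the empty grid
-- (ll[0] fails) and any row where index x is out of range.
def Pre_load_col (x : Int) (ll : List String) : Prop :=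
  ll ≠ [] ∧ ∀ s ∈ ll, (PySem.Str.pyGet? s x).isSome

instance (x : Int) (ll : List String) : Decidable (Pre_load_col x ll) := by
  unfold Pre_load_col; infer_instance

def pvWitness_load_col : Int × List String := (0, ["O", "#", "O"])

def Spec_load_col (x : Int) (ll : List String) (out : Int) : Prop := out = load_col_alt x ll
instance (x : Int) (ll : List String) (out : Int) : Decidable (Spec_load_col x ll out) := by
  unfold Spec_load_col; infer_instance

-- ===== CLAIM (what is proved, stated in full; the proofs are below) =====
def Claim_equal_load_col : Prop :=
  ∀ (x : Int) (ll : List String), Dom_load_col x ll → Pre_load_col x ll →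
    Spec_load_col x ll (load_col x ll)

-- ===== LEMMAS AND PROOFS =====

-- A's loop restated over the already-extracted column characters (proof helper only).
def charGo (len : Int) : List Char → Int → Int → Int → Int → Int
  | [], _, _, _, ret => ret
  | ch :: rest, i, base, n, ret =>
    if ch = 'O' then charGo len rest (i + 1) base (n + 1) (ret + (base - n))
    else if ch = '#' then charGo len rest (i + 1) (len - i - 1) 0 ret
    else charGo len rest (i + 1) base n ret

theorem go_eq_charGo (x len : Int) (ll : List String)
    (h : ∀ s ∈ ll, (PySem.Str.pyGet? s x).isSome) (i base n ret : Int) :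
    load_col_go x len ll i base n ret
      = charGo len (ll.filterMap (fun s => PySem.Str.pyGet? s x)) i base n ret := by
  induction ll generalizing i base n ret with
  | nil => simp [load_col_go, charGo]
  | cons s rest ih =>
    have hs := h s (List.mem_cons_self)
    cases hg : PySem.Str.pyGet? s x with
    | none => rw [hg] at hs; simp at hs
    | some ch =>
      have hrest : ∀ t ∈ rest, (PySem.Str.pyGet? t x).isSome :=
        fun t ht => h t (List.mem_cons_of_mem _ ht)
      simp only [load_col_go, List.filterMap_cons, hg, charGo]
      split_ifs <;> exact ih hrest ..

-- c*(c-1) is even, so its floor-division by 2 is exact.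
theorem two_mul_fd (c : Int) : 2 * PySem.Int.floordiv (c * (c - 1)) 2 = c * (c - 1) := by
  rw [PySem.Int.floordiv_eq_ediv_of_pos (by omega)]
  have h : (2 : Int) ∣ c * (c - 1) := (Int.even_mul_pred_self c).two_dvd
  omega

-- Across a '#'-free run, A's per-rock base-n accumulation totals the closed-form sum.
theorem charGo_seg (len : Int) (seg : List Char) (hseg : '#' ∉ seg)
    (rest : List Char) (i base n ret : Int) :
    charGo len (seg ++ rest) i base n ret
      = charGo len rest (i + (seg.length : Int)) base (n + (seg.count 'O' : Int))
          (ret + ((seg.count 'O' : Int) * (base - n)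
            - PySem.Int.floordiv ((seg.count 'O' : Int) * ((seg.count 'O' : Int) - 1)) 2)) := by
  induction seg generalizing i n ret with
  | nil => simp [PySem.Int.floordiv]
  | cons ch seg ih =>
    have hns : '#' ∉ seg := fun hm => hseg (List.mem_cons_of_mem _ hm)
    have hch : ch ≠ '#' := fun he => hseg (he ▸ List.mem_cons_self)
    by_cases hO : ch = 'O'
    · simp only [List.cons_append, charGo, if_pos hO]
      rw [ih hns]
      have hc : ((ch :: seg).count 'O' : Int) = (seg.count 'O' : Int) + 1 := by
        simp [hO]
      set c : Int := (seg.count 'O' : Int) with hcdef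
      rw [hc, show i + ((ch :: seg).length : Int) = i + 1 + (seg.length : Int) by
        push_cast [List.length_cons]; ring]
      congr 1
      · ring
      · nlinarith [two_mul_fd c, two_mul_fd (c + 1)]
    · simp only [List.cons_append, charGo, if_neg hO, if_neg hch]
      rw [ih hns]
      have hc : ((ch :: seg).count 'O' : Int) = (seg.count 'O' : Int) := by
        simp [hO]
      rw [hc, show i + ((ch :: seg).length : Int) = i + 1 + (seg.length : Int) by
        push_cast [List.length_cons]; ring]

-- Main invariant: at a segment boundary (row i, rocks reset, base = len - i) A's
-- remaining loop equals ret plus B's segment recursion from start = i.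
theorem charGo_eq_seg (len : Int) (rest : List Char) (i ret : Int) :
    charGo len rest i (len - i) 0 ret = ret + load_col_alt_go len i rest := by
  induction hL : rest.length using Nat.strong_induction_on generalizing rest i ret with
  | _ L ih =>
  cases rest with
  | nil => simp [charGo, load_col_alt_go]
  | cons a t =>
    set rest := a :: t with hrest
    have hsplit : rest.takeWhile (fun ch => ch ≠ '#') ++ rest.dropWhile (fun ch => ch ≠ '#') = rest :=
      List.takeWhile_append_dropWhile
    set seg := rest.takeWhile (fun ch => ch ≠ '#') with hsegdef
    have hseg : '#' ∉ seg := by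
      intro hm
      have := List.mem_takeWhile_imp hm
      simp at this
    set c : Int := (seg.count 'O' : Int) with hc
    rw [load_col_alt_go]
    simp only [← hrest, ← hsegdef, ← hc]
    rw [← hsplit]
    cases hdw : rest.dropWhile (fun ch => ch ≠ '#') with
    | nil =>
      rw [charGo_seg len seg hseg [] i (len - i) 0 ret]
      have hdrop : (seg ++ ([] : List Char)).drop (seg.length + 1) = [] := by
        simp
      rw [hdrop]
      simp [charGo, load_col_alt_go]
      ring
    | cons b t2 =>
      have hb : b = '#' := by
        have := List.head_dropWhile_not (p := fun ch => ch ≠ '#') (l := rest)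
        rw [hdw] at this
        simpa using this (by simp)
      subst hb
      rw [charGo_seg len seg hseg _ i (len - i) 0 ret]
      have hstep : charGo len ('#' :: t2) (i + (seg.length : Int)) (len - i) (0 + c)
            (ret + (c * (len - i - 0) - PySem.Int.floordiv (c * (c - 1)) 2))
          = charGo len t2 (i + (seg.length : Int) + 1)
              (len - (i + (seg.length : Int)) - 1) 0
              (ret + (c * (len - i - 0) - PySem.Int.floordiv (c * (c - 1)) 2)) := by
        simp [charGo]
      rw [hstep]
      have hlen2 : t2.length < L := by
        have : seg.length + (t2.length + 1) = L := by
          have := congrArg List.length (hsplit.trans rfl)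
          rw [hdw] at this
          simp at this
          omega
        omega
      have hIH := ih t2.length hlen2 t2 (i + (seg.length : Int) + 1)
        (ret + (c * (len - i - 0) - PySem.Int.floordiv (c * (c - 1)) 2)) rfl
      have he : len - (i + (seg.length : Int)) - 1 = len - (i + (seg.length : Int) + 1) := by ring
      rw [he, hIH]
      have hdrop : (seg ++ '#' :: t2).drop (seg.length + 1) = t2 := by
        simp [List.drop_append]
      rw [hdrop]
      ring_nf

-- ===== VERDICT (by name: the statement is the Claim_ definition above) =====
theorem load_col_spec : Claim_equal_load_col := by
  intro x ll _ hpre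
  obtain ⟨hne, hsome⟩ := hpre
  unfold Spec_load_col load_col load_col_alt
  rw [if_pos (by simpa [List.all_eq_true] using hsome)]
  rw [go_eq_charGo x (ll.length : Int) ll hsome]
  have h := charGo_eq_seg (ll.length : Int) (ll.filterMap (fun s => PySem.Str.pyGet? s x)) 0 0
  simp only [sub_zero, zero_add] at h
  exact h
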